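-- pv_equiv track=rewrite | github.com/hklie/scrabble | scrabble/study/web/server.py | _resolve_suffix
-- ===== SOURCE A (Python) =====
-- def _resolve_suffix(word, pattern):
--     """Resolve a suffix pattern like 'enV' to the actual suffix 'ena' for a word."""
--     if not pattern or not word:
--         return pattern
--     result = []
--     wi = len(word) - 1  # walk backwards through the word
--     for pi in range(len(pattern) - 1, -1, -1):
--         ch = pattern[pi]
--         if ch == "V":
--             result.append(word[wi] if wi >= 0 else "?")
--             wi -= 1
--         elif ch == "C":
--             result.append(word[wi] if wi >= 0 else "?")
--             wi -= 1
--         else: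
--             result.append(ch)
--             wi -= 1
--     return "".join(reversed(result))
-- ===== SOURCE B (Python) =====
-- def _resolve_suffix(word, pattern):
--     """Resolve a suffix pattern like 'enV' to the actual suffix 'ena' for a word."""
--     if not pattern or not word:
--         return pattern
--     offset = len(word) - len(pattern)
--     return "".join(
--         (word[offset + i] if offset + i >= 0 else "?") if ch in ("V", "C") else ch
--         for i, ch in enumerate(pattern)
--     )
-- ===== Notes on version B (the rewrite author's own statement) =====
-- stated objective: simpler
-- what changed: Replaces the backward walk with a decrementing wi accumulator, an appended list and a final reversal by a single forward pass that computes the word index in closed form (offset + i) and joins directly.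
import Mathlib
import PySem

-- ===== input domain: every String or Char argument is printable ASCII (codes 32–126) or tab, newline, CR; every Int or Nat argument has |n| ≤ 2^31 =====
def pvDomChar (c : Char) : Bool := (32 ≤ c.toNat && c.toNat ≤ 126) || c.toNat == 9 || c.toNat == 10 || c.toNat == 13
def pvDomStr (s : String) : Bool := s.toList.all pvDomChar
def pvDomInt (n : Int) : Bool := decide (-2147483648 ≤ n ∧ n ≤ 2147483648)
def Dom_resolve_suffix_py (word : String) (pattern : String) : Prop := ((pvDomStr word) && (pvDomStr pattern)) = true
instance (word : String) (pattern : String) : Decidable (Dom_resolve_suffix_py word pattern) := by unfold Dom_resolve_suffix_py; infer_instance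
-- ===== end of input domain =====

-- B replaces A's backward walk (decrementing wi accumulator + final reversal) by a
-- forward pass with the word index computed in closed form; objective: simpler.

-- ===== PORT A =====
-- literal transliteration of _resolve_suffix: backward loop over pattern indices,
-- state (result, wi), appending; join of the reversed result at the end.
def resolve_suffix_py (word : String) (pattern : String) : String :=
  if pattern.toList = [] ∨ word.toList = [] then pattern
  else
    let st :=
      (PySem.List.pyRange (PySem.Str.len pattern - 1) (-1) (-1)).foldl
        (fun (s : List Char × Int) pi =>
          let ch := (PySem.Str.pyGet? pattern pi).getD '?'
          if ch = 'V' then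
            (s.1 ++ [if 0 ≤ s.2 then (PySem.Str.pyGet? word s.2).getD '?' else '?'], s.2 - 1)
          else if ch = 'C' then
            (s.1 ++ [if 0 ≤ s.2 then (PySem.Str.pyGet? word s.2).getD '?' else '?'], s.2 - 1)
          else
            (s.1 ++ [ch], s.2 - 1))
        ([], PySem.Str.len word - 1)
    String.ofList st.1.reverse

-- ===== PORT B =====
-- literal transliteration of Source B: one forward pass over enumerate(pattern),
-- word index offset + i in closed form, no reversal.
def resolve_suffix_py_alt (word : String) (pattern : String) : String :=
  if pattern.toList = [] ∨ word.toList = [] then pattern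
  else
    let offset : Int := PySem.Str.len word - PySem.Str.len pattern
    String.ofList
      ((PySem.List.enumerate pattern.toList).map (fun p =>
        if p.2 = 'V' ∨ p.2 = 'C' then
          if 0 ≤ offset + p.1 then (PySem.Str.pyGet? word (offset + p.1)).getD '?' else '?'
        else p.2))

-- ===== PRECONDITION & SPEC =====
def Spec_resolve_suffix_py (word : String) (pattern : String) (out : String) : Prop := out = resolve_suffix_py_alt word pattern
instance (word : String) (pattern : String) (out : String) : Decidable (Spec_resolve_suffix_py word pattern out) := by unfold Spec_resolve_suffix_py; infer_instance

-- ===== CLAIM (what is proved, stated in full; the proofs are below) =====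
def Claim_equal_resolve_suffix_py : Prop := ∀ (word : String) (pattern : String), Dom_resolve_suffix_py word pattern → Spec_resolve_suffix_py word pattern (resolve_suffix_py word pattern)

-- ===== LEMMAS AND PROOFS =====

-- A's per-index character, as a function of the pattern index pi and the word cursor wi.
def pvStepChar (word pattern : String) (pi wi : Int) : Char :=
  let ch := (PySem.Str.pyGet? pattern pi).getD '?'
  if ch = 'V' then (if 0 ≤ wi then (PySem.Str.pyGet? word wi).getD '?' else '?')
  else if ch = 'C' then (if 0 ≤ wi then (PySem.Str.pyGet? word wi).getD '?' else '?')
  else ch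

-- A's loop, unrolled: each iteration appends pvStepChar of the current index and a
-- cursor that has been decremented once per previous iteration.
theorem foldA_spec (word pattern : String) (ks : List Int) :
    ∀ (s : Nat) (acc : List Char) (w0 : Int),
    ks.foldl
      (fun (s : List Char × Int) pi =>
        let ch := (PySem.Str.pyGet? pattern pi).getD '?'
        if ch = 'V' then
          (s.1 ++ [if 0 ≤ s.2 then (PySem.Str.pyGet? word s.2).getD '?' else '?'], s.2 - 1)
        else if ch = 'C' then
          (s.1 ++ [if 0 ≤ s.2 then (PySem.Str.pyGet? word s.2).getD '?' else '?'], s.2 - 1)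
        else
          (s.1 ++ [ch], s.2 - 1))
      (acc, w0)
    = (acc ++ (ks.zipIdx s).map (fun q => pvStepChar word pattern q.1 (w0 + s - q.2)),
       w0 - ks.length) := by
  have hstep :
      (fun (s : List Char × Int) pi =>
        let ch := (PySem.Str.pyGet? pattern pi).getD '?'
        if ch = 'V' then
          (s.1 ++ [if 0 ≤ s.2 then (PySem.Str.pyGet? word s.2).getD '?' else '?'], s.2 - 1)
        else if ch = 'C' then
          (s.1 ++ [if 0 ≤ s.2 then (PySem.Str.pyGet? word s.2).getD '?' else '?'], s.2 - 1)
        else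
          (s.1 ++ [ch], s.2 - 1))
      = (fun (s : List Char × Int) pi => (s.1 ++ [pvStepChar word pattern pi s.2], s.2 - 1)) := by
    funext s pi
    simp only [pvStepChar]
    split_ifs <;> rfl
  rw [hstep]
  induction ks with
  | nil => intro s acc w0; simp
  | cons k ks ih =>
      intro s acc w0
      simp only [List.foldl_cons, List.zipIdx_cons, List.map_cons]
      rw [ih (s + 1)]
      simp only [Prod.mk.injEq]
      constructor
      · rw [List.append_assoc, List.singleton_append]
        congr 1
        congr 1
        · congr 1
          omega
        · apply List.map_congr_left
          intro q _
          congr 1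
          omega
      · simp only [List.length_cons]
        omega

-- ===== VERDICT (by name: the statement is the Claim_ definition above) =====
theorem resolve_suffix_py_spec : Claim_equal_resolve_suffix_py := by
  intro word pattern _
  unfold Spec_resolve_suffix_py resolve_suffix_py resolve_suffix_py_alt
  by_cases hg : pattern.toList = [] ∨ word.toList = []
  · rw [if_pos hg, if_pos hg]
  · rw [if_neg hg, if_neg hg]
    push Not at hg
    have hn : 0 < pattern.toList.length := List.length_pos_iff.mpr hg.1
    have hm : 0 < word.toList.length := List.length_pos_iff.mpr hg.2
    rw [foldA_spec word pattern _ 0 [] (PySem.Str.len word - 1)]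
    dsimp only
    congr 1
    rw [PySem.List.pyRange_neg_one,
      show (PySem.Str.len pattern - 1 - -1).toNat = pattern.toList.length by
        simp [PySem.Str.len_eq]]
    apply List.ext_getElem
    · simp
    · intro i hi1 hi2
      simp only [List.nil_append, List.length_reverse, List.length_map, List.length_zipIdx,
        List.length_range] at hi1
      simp only [List.length_map, PySem.List.length_enumerate] at hi2
      simp only [List.nil_append, List.getElem_reverse, List.getElem_map, List.getElem_zipIdx,
        List.getElem_range, List.length_map, List.length_zipIdx, List.length_range,
        PySem.List.getElem_enumerate, PySem.Str.len_eq, Nat.cast_zero, zero_add, add_zero]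
      rw [show ((pattern.toList.length : Int) - 1 - ((pattern.toList.length - 1 - i : Nat) : Int))
              = (i : Int) by omega,
          show ((word.toList.length : Int) - 1 - ((pattern.toList.length - 1 - i : Nat) : Int))
              = (word.toList.length : Int) - (pattern.toList.length : Int) + (i : Int) by omega]
      simp only [pvStepChar, PySem.Str.pyGet?_natCast]
      rw [List.getElem?_eq_getElem hi2]
      simp only [Option.getD_some]
      by_cases h1 : pattern.toList[i] = 'V'
      · simp [h1]
      · by_cases h2 : pattern.toList[i] = 'C'
        · simp [h2]
        · simp [h1, h2]
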